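-- pv_equiv track=rewrite | github.com/ShaffiSanza/CORET | backend/services/shopify_client.py | _infer_style_context
-- ===== SOURCE A (Python) =====
-- _MENSWEAR_KEYWORDS = {"men", "mens", "men's", "herre", "herr", "male", "man"}
--
-- _WOMENSWEAR_KEYWORDS = {"women", "womens", "women's", "dame", "damer", "female", "woman", "kvinner"}
--
-- _UNISEX_KEYWORDS = {"unisex", "gender-neutral", "genderless"}
--
-- def _infer_style_context(tags: list[str], title: str) -> str:
--     """Infer style_context from product tags and title.
--     Returns 'menswear', 'womenswear', or 'unisex' (default)."""
--     text = " ".join(t.lower() for t in tags) + " " + title.lower()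
--     tokens = set(text.replace("'", "").replace("-", " ").split())
--
--     if tokens & _UNISEX_KEYWORDS:
--         return "unisex"
--     has_men = bool(tokens & _MENSWEAR_KEYWORDS)
--     has_women = bool(tokens & _WOMENSWEAR_KEYWORDS)
--     if has_men and has_women:
--         return "unisex"
--     if has_men:
--         return "menswear"
--     if has_women:
--         return "womenswear"
--     return "unisex"
-- ===== SOURCE B (Python) =====
-- _MENSWEAR_KEYWORDS = {"men", "mens", "men's", "herre", "herr", "male", "man"}
--
-- _WOMENSWEAR_KEYWORDS = {"women", "womens", "women's", "dame", "damer", "female", "woman", "kvinner"}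
--
-- _UNISEX_KEYWORDS = {"unisex", "gender-neutral", "genderless"}
--
-- # One combined keyword -> category map built once from the same three constant
-- # sets (each key maps to exactly one category, so dict order is irrelevant).
-- _STYLE_LOOKUP = {}
-- for _label, _kws in (("menswear", _MENSWEAR_KEYWORDS),
--                      ("womenswear", _WOMENSWEAR_KEYWORDS),
--                      ("unisex", _UNISEX_KEYWORDS)):
--     for _kw in _kws:
--         _STYLE_LOOKUP[_kw] = _label
--
--
-- def _infer_style_context(tags: list[str], title: str) -> str:
--     """Infer style_context from product tags and title.
--     Returns 'menswear', 'womenswear', or 'unisex' (default)."""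
--     text = " ".join(t.lower() for t in tags) + " " + title.lower()
--     labels = set()
--     for tok in text.replace("'", "").replace("-", " ").split():
--         label = _STYLE_LOOKUP.get(tok)
--         if label is not None:
--             labels.add(label)
--     return labels.pop() if len(labels) == 1 else "unisex"
-- ===== Notes on version B (the rewrite author's own statement) =====
-- stated objective: alternative
-- what changed: Replaces A's three token-set/keyword-set intersections and its has_men/has_women branch chain by one combined keyword->category dictionary built once, a single pass over the tokens collecting the set of categories seen, and a cardinality rule (exactly one category seen -> that category, otherwise 'unisex').
import Mathlib
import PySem

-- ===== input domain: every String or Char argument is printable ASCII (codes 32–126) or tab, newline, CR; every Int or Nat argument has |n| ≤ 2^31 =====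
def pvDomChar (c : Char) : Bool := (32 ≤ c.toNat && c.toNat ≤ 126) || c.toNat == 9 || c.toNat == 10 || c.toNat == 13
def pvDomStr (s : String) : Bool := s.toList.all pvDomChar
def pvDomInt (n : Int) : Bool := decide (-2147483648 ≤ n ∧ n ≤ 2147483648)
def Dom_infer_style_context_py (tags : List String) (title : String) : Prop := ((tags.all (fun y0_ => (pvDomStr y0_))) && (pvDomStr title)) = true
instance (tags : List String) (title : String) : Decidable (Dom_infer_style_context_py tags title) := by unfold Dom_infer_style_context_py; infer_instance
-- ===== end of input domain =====

-- B replaces A's three set intersections and branch chain by one combined keyword->category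
-- dict, a single pass over the tokens collecting the categories seen, and a cardinality rule
-- (exactly one category -> that category, otherwise 'unisex'); objective: alternative.

-- ===== PORT A =====
def pvMenKw : PySem.Set (List Char) :=
  PySem.Set.ofList ["men".toList, "mens".toList, "men's".toList, "herre".toList, "herr".toList, "male".toList, "man".toList]
def pvWomenKw : PySem.Set (List Char) :=
  PySem.Set.ofList ["women".toList, "womens".toList, "women's".toList, "dame".toList, "damer".toList, "female".toList, "woman".toList, "kvinner".toList]
def pvUniKw : PySem.Set (List Char) :=
  PySem.Set.ofList ["unisex".toList, "gender-neutral".toList, "genderless".toList]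

def infer_style_context_py (tags : List String) (title : String) : String :=
  let text : List Char :=
    PySem.Chars.join [' '] (tags.map (fun t => PySem.Chars.lower t.toList)) ++ [' '] ++ PySem.Chars.lower title.toList
  let tokens : PySem.Set (List Char) :=
    PySem.Set.ofList (PySem.Chars.split₀ (PySem.Chars.replace (PySem.Chars.replace text ['\''] []) ['-'] [' ']))
  if PySem.Set.inter tokens pvUniKw ≠ [] then "unisex"
  else
    let has_men : Prop := PySem.Set.inter tokens pvMenKw ≠ []
    let has_women : Prop := PySem.Set.inter tokens pvWomenKw ≠ []
    if has_men ∧ has_women then "unisex"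
    else if has_men then "menswear"
    else if has_women then "womenswear"
    else "unisex"

-- ===== PORT B =====
-- Source B builds _STYLE_LOOKUP by inserting every keyword with its label (each keyword maps to
-- exactly one label, so Python's set-iteration order cannot affect the dict's lookups).
def pvStylePairs : List (List Char × String) :=
  [("men".toList, "menswear"), ("mens".toList, "menswear"), ("men's".toList, "menswear"),
   ("herre".toList, "menswear"), ("herr".toList, "menswear"), ("male".toList, "menswear"),
   ("man".toList, "menswear"),
   ("women".toList, "womenswear"), ("womens".toList, "womenswear"), ("women's".toList, "womenswear"),
   ("dame".toList, "womenswear"), ("damer".toList, "womenswear"), ("female".toList, "womenswear"),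
   ("woman".toList, "womenswear"), ("kvinner".toList, "womenswear"),
   ("unisex".toList, "unisex"), ("gender-neutral".toList, "unisex"), ("genderless".toList, "unisex")]

def pvStyleLookup : PySem.Dict (List Char) String :=
  pvStylePairs.foldl (fun d kv => d.insert kv.1 kv.2) PySem.Dict.empty

def pvCollectStep (s : PySem.Set String) (tok : List Char) : PySem.Set String :=
  match pvStyleLookup.get? tok with
  | some lab => PySem.Set.add s lab
  | none => s

def infer_style_context_py_alt (tags : List String) (title : String) : String :=
  let text : List Char :=
    PySem.Chars.join [' '] (tags.map (fun t => PySem.Chars.lower t.toList)) ++ [' '] ++ PySem.Chars.lower title.toList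
  let labels : PySem.Set String :=
    (PySem.Chars.split₀ (PySem.Chars.replace (PySem.Chars.replace text ['\''] []) ['-'] [' '])).foldl
      pvCollectStep PySem.Set.empty
  -- labels.pop() on a one-element set is its only element: ported as headI under len == 1
  if PySem.Set.len labels == 1 then labels.headI else "unisex"

-- ===== PRECONDITION & SPEC =====
def Spec_infer_style_context_py (tags : List String) (title : String) (out : String) : Prop := out = infer_style_context_py_alt tags title
instance (tags : List String) (title : String) (out : String) : Decidable (Spec_infer_style_context_py tags title out) := by unfold Spec_infer_style_context_py; infer_instance

-- ===== CLAIM (what is proved, stated in full; the proofs are below) =====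
def Claim_equal_infer_style_context_py : Prop := ∀ (tags : List String) (title : String), Dom_infer_style_context_py tags title → Spec_infer_style_context_py tags title (infer_style_context_py tags title)

-- ===== LEMMAS AND PROOFS =====

lemma pv_mem_foldl_step (toks : List (List Char)) (s : PySem.Set String) (lab : String) :
    lab ∈ toks.foldl pvCollectStep s ↔ lab ∈ s ∨ ∃ t ∈ toks, pvStyleLookup.get? t = some lab := by
  induction toks generalizing s with
  | nil => simp
  | cons t ts ih =>
    simp only [List.foldl_cons, ih, List.mem_cons]
    unfold pvCollectStep
    cases h : pvStyleLookup.get? t with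
    | none =>
      constructor
      · rintro (hs | ⟨u, hu, hl⟩)
        · exact Or.inl hs
        · exact Or.inr ⟨u, Or.inr hu, hl⟩
      · rintro (hs | ⟨u, (rfl | hu), hl⟩)
        · exact Or.inl hs
        · rw [h] at hl; cases hl
        · exact Or.inr ⟨u, hu, hl⟩
    | some l =>
      rw [PySem.Set.mem_add]
      constructor
      · rintro ((hs | rfl) | ⟨u, hu, hl⟩)
        · exact Or.inl hs
        · exact Or.inr ⟨t, Or.inl rfl, h⟩
        · exact Or.inr ⟨u, Or.inr hu, hl⟩
      · rintro (hs | ⟨u, (rfl | hu), hl⟩)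
        · exact Or.inl (Or.inl hs)
        · rw [h] at hl; exact Or.inl (Or.inr (Option.some.inj hl).symm)
        · exact Or.inr ⟨u, hu, hl⟩

lemma pv_nodup_foldl_step (toks : List (List Char)) (s : PySem.Set String) (hs : s.Nodup) :
    (toks.foldl pvCollectStep s).Nodup := by
  induction toks generalizing s with
  | nil => exact hs
  | cons t ts ih =>
    simp only [List.foldl_cons]
    apply ih
    unfold pvCollectStep
    cases pvStyleLookup.get? t with
    | none => exact hs
    | some l => exact PySem.Set.nodup_add _ _ hs

lemma pv_lookup_men (t : List Char) (h : t ∈ (pvMenKw : List (List Char))) :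
    pvStyleLookup.get? t = some "menswear" := by
  rw [show (pvMenKw : List (List Char)) = ["men".toList, "mens".toList, "men's".toList,
    "herre".toList, "herr".toList, "male".toList, "man".toList] from by decide] at h
  simp only [List.mem_cons, List.not_mem_nil, or_false] at h
  rcases h with rfl | rfl | rfl | rfl | rfl | rfl | rfl <;> decide

lemma pv_lookup_women (t : List Char) (h : t ∈ (pvWomenKw : List (List Char))) :
    pvStyleLookup.get? t = some "womenswear" := by
  rw [show (pvWomenKw : List (List Char)) = ["women".toList, "womens".toList, "women's".toList,
    "dame".toList, "damer".toList, "female".toList, "woman".toList, "kvinner".toList] from by decide] at h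
  simp only [List.mem_cons, List.not_mem_nil, or_false] at h
  rcases h with rfl | rfl | rfl | rfl | rfl | rfl | rfl | rfl <;> decide

lemma pv_lookup_uni (t : List Char) (h : t ∈ (pvUniKw : List (List Char))) :
    pvStyleLookup.get? t = some "unisex" := by
  rw [show (pvUniKw : List (List Char)) = ["unisex".toList, "gender-neutral".toList,
    "genderless".toList] from by decide] at h
  simp only [List.mem_cons, List.not_mem_nil, or_false] at h
  rcases h with rfl | rfl | rfl <;> decide

lemma pv_lookup_cases (t : List Char) (lab : String) (h : pvStyleLookup.get? t = some lab) :
    (lab = "menswear" ∧ t ∈ (pvMenKw : List (List Char))) ∨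
    (lab = "womenswear" ∧ t ∈ (pvWomenKw : List (List Char))) ∨
    (lab = "unisex" ∧ t ∈ (pvUniKw : List (List Char))) := by
  have hk : pvStyleLookup.keys.Nodup := by decide
  have h' : (t, lab) ∈ pvStyleLookup.items :=
    (PySem.Dict.get?_eq_some_iff_mem_items _ _ _ hk).mp h
  rw [show pvStyleLookup.items = pvStylePairs from by decide] at h'
  simp only [pvStylePairs, List.mem_cons, List.not_mem_nil, or_false, Prod.mk.injEq] at h'
  rcases h' with ⟨rfl, rfl⟩ | ⟨rfl, rfl⟩ | ⟨rfl, rfl⟩ | ⟨rfl, rfl⟩ | ⟨rfl, rfl⟩ | ⟨rfl, rfl⟩ | ⟨rfl, rfl⟩ | ⟨rfl, rfl⟩ | ⟨rfl, rfl⟩ | ⟨rfl, rfl⟩ | ⟨rfl, rfl⟩ | ⟨rfl, rfl⟩ | ⟨rfl, rfl⟩ | ⟨rfl, rfl⟩ | ⟨rfl, rfl⟩ | ⟨rfl, rfl⟩ | ⟨rfl, rfl⟩ | ⟨rfl, rfl⟩ <;> decide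

lemma pv_inter_ne_nil (toks : List (List Char)) (K : List (List Char)) :
    PySem.Set.inter (PySem.Set.ofList toks) K ≠ [] ↔ ∃ t ∈ toks, t ∈ K := by
  rw [ne_eq, List.eq_nil_iff_forall_not_mem]
  push Not
  constructor
  · rintro ⟨x, hx⟩
    rw [PySem.Set.mem_inter, PySem.Set.mem_ofList] at hx
    exact ⟨x, hx.1, hx.2⟩
  · rintro ⟨x, h1, h2⟩
    exact ⟨x, by rw [PySem.Set.mem_inter, PySem.Set.mem_ofList]; exact ⟨h1, h2⟩⟩

lemma pv_singleton_of_nodup {L : List String} {m : String} (hn : L.Nodup) (hm : m ∈ L)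
    (hall : ∀ y ∈ L, y = m) : L = [m] := by
  cases L with
  | nil => cases hm
  | cons a rest =>
    have ha : a = m := hall a (List.mem_cons_self ..)
    subst ha
    cases rest with
    | nil => rfl
    | cons b r =>
      have hb : b = a := hall b (by simp)
      simp [hb] at hn

lemma pv_out_ne_one {L : List String} (h : (PySem.Set.len L == 1) = false) :
    (if PySem.Set.len L == 1 then L.headI else "unisex") = "unisex" := by
  rw [h]; rfl

lemma pv_len_ne_one {L : PySem.Set String} {x y : String} (hx : x ∈ L) (hy : y ∈ L)
    (hxy : x ≠ y) : (PySem.Set.len L == 1) = false := by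
  simp only [PySem.Set.len, beq_eq_false_iff_ne, ne_eq]
  intro hlen
  have hl : List.length L = 1 := by exact_mod_cast hlen
  obtain ⟨z, rfl⟩ := List.length_eq_one_iff.mp hl
  rw [List.mem_singleton] at hx hy
  exact hxy (hx.trans hy.symm)

lemma pv_classify_eq (toks : List (List Char)) :
    (if PySem.Set.inter (PySem.Set.ofList toks) pvUniKw ≠ [] then "unisex"
     else if (PySem.Set.inter (PySem.Set.ofList toks) pvMenKw ≠ []) ∧
             (PySem.Set.inter (PySem.Set.ofList toks) pvWomenKw ≠ []) then "unisex"
     else if PySem.Set.inter (PySem.Set.ofList toks) pvMenKw ≠ [] then "menswear"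
     else if PySem.Set.inter (PySem.Set.ofList toks) pvWomenKw ≠ [] then "womenswear"
     else "unisex") =
    (if PySem.Set.len (toks.foldl pvCollectStep PySem.Set.empty) == 1
     then (toks.foldl pvCollectStep PySem.Set.empty).headI else "unisex") := by
  simp only [pv_inter_ne_nil]
  have hnodup : (toks.foldl pvCollectStep PySem.Set.empty).Nodup :=
    pv_nodup_foldl_step toks _ List.nodup_nil
  have hmem : ∀ lab, lab ∈ toks.foldl pvCollectStep PySem.Set.empty ↔
      ∃ t ∈ toks, pvStyleLookup.get? t = some lab := by
    intro lab
    rw [pv_mem_foldl_step]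
    simp [PySem.Set.empty]
  generalize toks.foldl pvCollectStep PySem.Set.empty = L at hnodup hmem ⊢
  by_cases hu : ∃ t ∈ toks, t ∈ (pvUniKw : List (List Char))
  · rw [if_pos hu]
    have hmu : "unisex" ∈ L := by
      obtain ⟨t, ht, hkk⟩ := hu
      exact (hmem _).mpr ⟨t, ht, pv_lookup_uni t hkk⟩
    cases h1 : (PySem.Set.len L == 1) with
    | false => rfl
    | true =>
      simp only [PySem.Set.len, beq_iff_eq] at h1
      have hl : List.length L = 1 := by exact_mod_cast h1
      obtain ⟨z, rfl⟩ := List.length_eq_one_iff.mp hl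
      rw [List.mem_singleton] at hmu
      subst hmu
      rfl
  · rw [if_neg hu]
    by_cases hm : ∃ t ∈ toks, t ∈ (pvMenKw : List (List Char)) <;>
      by_cases hw : ∃ t ∈ toks, t ∈ (pvWomenKw : List (List Char))
    · rw [if_pos ⟨hm, hw⟩]
      obtain ⟨tm, htm, hkm⟩ := hm
      obtain ⟨tw, htw, hkw⟩ := hw
      have h1 : "menswear" ∈ L := (hmem _).mpr ⟨tm, htm, pv_lookup_men tm hkm⟩
      have h2 : "womenswear" ∈ L := (hmem _).mpr ⟨tw, htw, pv_lookup_women tw hkw⟩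
      exact (pv_out_ne_one (pv_len_ne_one h1 h2 (by decide))).symm
    · rw [if_neg (fun h => hw h.2), if_pos hm]
      obtain ⟨tm, htm, hkm⟩ := hm
      have h1 : "menswear" ∈ L := (hmem _).mpr ⟨tm, htm, pv_lookup_men tm hkm⟩
      have hall : ∀ y ∈ L, y = "menswear" := by
        intro y hy
        obtain ⟨t, ht, hget⟩ := (hmem _).mp hy
        rcases pv_lookup_cases t y hget with ⟨rfl, _⟩ | ⟨rfl, hkk⟩ | ⟨rfl, hkk⟩
        · rfl
        · exact absurd ⟨t, ht, hkk⟩ hw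
        · exact absurd ⟨t, ht, hkk⟩ hu
      rw [pv_singleton_of_nodup hnodup h1 hall]
      decide
    · rw [if_neg (fun h => hm h.1), if_neg hm, if_pos hw]
      obtain ⟨tw, htw, hkw⟩ := hw
      have h1 : "womenswear" ∈ L := (hmem _).mpr ⟨tw, htw, pv_lookup_women tw hkw⟩
      have hall : ∀ y ∈ L, y = "womenswear" := by
        intro y hy
        obtain ⟨t, ht, hget⟩ := (hmem _).mp hy
        rcases pv_lookup_cases t y hget with ⟨rfl, hkk⟩ | ⟨rfl, _⟩ | ⟨rfl, hkk⟩
        · exact absurd ⟨t, ht, hkk⟩ hm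
        · rfl
        · exact absurd ⟨t, ht, hkk⟩ hu
      rw [pv_singleton_of_nodup hnodup h1 hall]
      decide
    · rw [if_neg (fun h => hm h.1), if_neg hm, if_neg hw]
      have hnil : L = [] := by
        rw [List.eq_nil_iff_forall_not_mem]
        intro y hy
        obtain ⟨t, ht, hget⟩ := (hmem _).mp hy
        rcases pv_lookup_cases t y hget with ⟨_, hkk⟩ | ⟨_, hkk⟩ | ⟨_, hkk⟩
        · exact hm ⟨t, ht, hkk⟩
        · exact hw ⟨t, ht, hkk⟩
        · exact hu ⟨t, ht, hkk⟩
      rw [hnil]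
      decide

-- ===== VERDICT (by name: the statement is the Claim_ definition above) =====
theorem infer_style_context_py_spec : Claim_equal_infer_style_context_py := by
  intro tags title _
  unfold Spec_infer_style_context_py infer_style_context_py infer_style_context_py_alt
  exact pv_classify_eq _
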